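-- pv_equiv track=rewrite | github.com/bessiel6745/recursiveGenetics | recursiveGenetics.py | countOtherBases
-- ===== SOURCE A (Python) =====
-- def countOtherBases(seq, exclude):
--     """returns the amount of bases excluding the excluded parameter"""
--     if len(seq) == 0:
--         return 0
--     else:
--         if seq[0] != exclude:
--             return 1+ countOtherBases(seq[1:], exclude)
--         else:
--             return countOtherBases(seq[1:], exclude)
-- ===== SOURCE B (Python) =====
-- def countOtherBases(seq, exclude):
--     """returns the amount of bases excluding the excluded parameter"""
--     count = 0
--     for base in seq:
--         if base != exclude:
--             count += 1
--     return count
-- ===== Notes on version B (the rewrite author's own statement) =====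
-- stated objective: faster
-- what changed: Replaced O(n^2) tail recursion on string slices with a single explicit for-loop over the characters keeping an integer accumulator.
import Mathlib
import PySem

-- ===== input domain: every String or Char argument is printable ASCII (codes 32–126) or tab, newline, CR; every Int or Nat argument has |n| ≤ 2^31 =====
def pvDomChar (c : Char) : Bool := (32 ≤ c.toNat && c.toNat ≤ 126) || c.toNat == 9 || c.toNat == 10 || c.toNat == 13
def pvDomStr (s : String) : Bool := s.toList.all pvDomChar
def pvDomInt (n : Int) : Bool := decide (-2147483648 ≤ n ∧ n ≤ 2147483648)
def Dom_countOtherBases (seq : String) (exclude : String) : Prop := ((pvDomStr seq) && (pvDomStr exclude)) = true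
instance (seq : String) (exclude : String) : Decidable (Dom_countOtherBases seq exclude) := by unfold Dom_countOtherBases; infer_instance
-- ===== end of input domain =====

-- B: explicit loop with an integer accumulator instead of A's recursion on string slices (asymptotically faster: O(n) vs O(n^2)).
-- ===== PORT A =====
-- helper: A's recursion on the sequence; seq[0] is a one-char string compared with exclude, seq[1:] is the tail
def countOtherBasesA : List Char → String → Int
  | [], _ => 0
  | c :: rest, exclude =>
      if String.mk [c] ≠ exclude then 1 + countOtherBasesA rest exclude
      else countOtherBasesA rest exclude

def countOtherBases (seq : String) (exclude : String) : Int :=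
  countOtherBasesA seq.toList exclude

-- ===== PORT B =====
def countOtherBases_alt (seq : String) (exclude : String) : Int :=
  seq.toList.foldl (fun count base => if String.mk [base] ≠ exclude then count + 1 else count) 0

-- ===== PRECONDITION & SPEC =====
def Spec_countOtherBases (seq : String) (exclude : String) (out : Int) : Prop := out = countOtherBases_alt seq exclude
instance (seq : String) (exclude : String) (out : Int) : Decidable (Spec_countOtherBases seq exclude out) := by unfold Spec_countOtherBases; infer_instance

-- ===== CLAIM (what is proved, stated in full; the proofs are below) =====
def Claim_equal_countOtherBases : Prop := ∀ (seq : String) (exclude : String), Dom_countOtherBases seq exclude → Spec_countOtherBases seq exclude (countOtherBases seq exclude)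

-- ===== LEMMAS AND PROOFS =====

-- ===== VERDICT (by name: the statement is the Claim_ definition above) =====
theorem countOtherBasesA_foldl (l : List Char) (exclude : String) (acc : Int) :
    l.foldl (fun count base => if String.mk [base] ≠ exclude then count + 1 else count) acc
      = acc + countOtherBasesA l exclude := by
  induction l generalizing acc with
  | nil => simp [countOtherBasesA]
  | cons c rest ih =>
      simp only [List.foldl, countOtherBasesA]
      split_ifs with h <;> rw [ih] <;> ring

theorem countOtherBases_spec : Claim_equal_countOtherBases := by
  intro seq exclude _
  unfold Spec_countOtherBases countOtherBases countOtherBases_alt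
  rw [countOtherBasesA_foldl]
  ring
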